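-- pv_equiv track=rewrite | github.com/vinchinzu/euler | python/782/thorough_comp.py | compute_cnk_direct
-- ===== SOURCE A (Python) =====
-- import itertools
--
-- def compute_cnk_direct(n, max_patterns=2):
--     """Find min complexity for each k using up to max_patterns row types."""
--     best = {}
--
--     all_vecs = list(itertools.product([0,1], repeat=n))
--
--     if max_patterns == 2:
--         for idx_p, P in enumerate(all_vecs):
--             for Q in all_vecs[idx_p:]:  # P <= Q
--                 for sigma in all_vecs:
--                     # Build matrix
--                     k = 0
--                     col_sums = {}
--                     patterns = set()
--                     patterns.add(P)
--                     patterns.add(Q)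
--
--                     valid = True
--                     for j in range(n):
--                         col = tuple(P[j] if sigma[i] else Q[j] for i in range(n))
--                         patterns.add(col)
--                         k += sum(col)
--
--                     comp = len(patterns)
--                     if k not in best or comp < best[k]:
--                         best[k] = comp
--
--     return best
-- ===== SOURCE B (Python) =====
-- import itertools
--
-- def compute_cnk_direct(n, max_patterns=2):
--     """Find min complexity for each k using up to max_patterns row types."""
--     best = {}
--
--     all_vecs = list(itertools.product([0, 1], repeat=n))
--
--     if max_patterns == 2:
--         ones = (1,) * n
--         zeros = (0,) * n
--         for idx_p, P in enumerate(all_vecs):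
--             wP = sum(P)
--             for Q in all_vecs[idx_p:]:
--                 wQ = sum(Q)
--                 pairs = set(zip(P, Q))
--                 has11 = (1, 1) in pairs
--                 has00 = (0, 0) in pairs
--                 has10 = (1, 0) in pairs
--                 has01 = (0, 1) in pairs
--                 for sigma in all_vecs:
--                     s = sum(sigma)
--                     k = s * wP + (n - s) * wQ
--                     patterns = {P, Q}
--                     if has11:
--                         patterns.add(ones)
--                     if has00:
--                         patterns.add(zeros)
--                     if has10:
--                         patterns.add(sigma)
--                     if has01:
--                         patterns.add(tuple(1 - x for x in sigma))
--                     comp = len(patterns)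
--                     if k not in best or comp < best[k]:
--                         best[k] = comp
--
--     return best
-- ===== Notes on version B (the rewrite author's own statement) =====
-- stated objective: faster
-- what changed: B replaces A's inner O(n^2) per-(P,Q,sigma) matrix build (n columns of n entries each) by per-(P,Q) precomputation: row weights and the set of distinct (P[j],Q[j]) bit pairs are computed once, then for each sigma the total k is the closed form s*wP+(n-s)*wQ (s = popcount of sigma) and the pattern set is {P,Q} plus at most four candidate columns (ones, zeros, sigma, complement of sigma) selected by the precomputed pair flags.
import Mathlib
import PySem

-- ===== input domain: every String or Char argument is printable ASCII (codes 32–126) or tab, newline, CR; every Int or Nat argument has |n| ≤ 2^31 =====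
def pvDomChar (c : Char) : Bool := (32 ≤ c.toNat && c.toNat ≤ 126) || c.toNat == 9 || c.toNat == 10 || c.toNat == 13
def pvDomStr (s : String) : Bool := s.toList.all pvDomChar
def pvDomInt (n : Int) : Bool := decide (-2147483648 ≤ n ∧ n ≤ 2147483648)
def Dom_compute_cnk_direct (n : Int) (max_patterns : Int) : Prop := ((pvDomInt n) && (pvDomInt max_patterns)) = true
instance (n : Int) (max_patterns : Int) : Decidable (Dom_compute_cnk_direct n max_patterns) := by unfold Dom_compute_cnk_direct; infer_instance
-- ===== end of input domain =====

-- B precomputes per (P,Q) the row weights and the set of distinct (P[j],Q[j]) bit pairs, and per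
-- sigma uses the closed form k = s*wP+(n-s)*wQ and at most four candidate columns, instead of A's
-- per-(P,Q,sigma) rebuild of every column (objective: faster).

-- ===== PORT A =====
-- list(itertools.product([0,1], repeat=n)); exact for n ≥ 0 (Pre_ excludes n < 0, where Python raises ValueError)
def pvProdNat : Nat → List (List Int)
  | 0 => [[]]
  | m + 1 => ([0, 1] : List Int).flatMap (fun b => (pvProdNat m).map (fun v => b :: v))

def pvAllVecs (n : Int) : List (List Int) := pvProdNat n.toNat

-- 'if k not in best or comp < best[k]: best[k] = comp'
def pvUpdate (best : PySem.Dict Int Int) (k comp : Int) : PySem.Dict Int Int :=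
  match best.get? k with
  | none => best.insert k comp
  | some v => if comp < v then best.insert k comp else best

-- the body of A's sigma-loop: k and comp (= len(patterns)) for one (P,Q,sigma) triple
def pvInnerA (n : Int) (P Q sigma : List Int) : Int × Int :=
  let r := (PySem.List.pyRange 0 n 1).foldl
    (fun (acc : Int × PySem.Set (List Int)) j =>
      let col := (PySem.List.pyRange 0 n 1).map
        (fun i => if PySem.List.pyGetD sigma i 0 ≠ 0 then PySem.List.pyGetD P j 0
                  else PySem.List.pyGetD Q j 0)   -- indices in range throughout (Pre_)
      (acc.1 + col.sum, PySem.Set.add acc.2 col))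
    (0, PySem.Set.add (PySem.Set.add PySem.Set.empty P) Q)
  (r.1, PySem.Set.len r.2)

def compute_cnk_direct (n : Int) (max_patterns : Int) : List (Int × Int) :=
  let all_vecs := pvAllVecs n
  let best : PySem.Dict Int Int :=
    if max_patterns = 2 then
      (PySem.List.enumerate all_vecs 0).foldl (fun best pP =>
        (PySem.List.slice all_vecs (some pP.1) none).foldl (fun best Q =>
          all_vecs.foldl (fun best sigma =>
            let kc := pvInnerA n pP.2 Q sigma
            pvUpdate best kc.1 kc.2) best) best) PySem.Dict.empty
    else PySem.Dict.empty
  best.items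

-- ===== PORT B =====
-- the body of B's sigma-loop
def pvInnerB (n : Int) (P Q ones zeros : List Int) (has11 has00 has10 has01 : Bool)
    (wP wQ : Int) (sigma : List Int) : Int × Int :=
  let s := sigma.sum
  let k := s * wP + (n - s) * wQ
  let patterns : PySem.Set (List Int) := PySem.Set.ofList [P, Q]
  let patterns := if has11 then PySem.Set.add patterns ones else patterns
  let patterns := if has00 then PySem.Set.add patterns zeros else patterns
  let patterns := if has10 then PySem.Set.add patterns sigma else patterns
  let patterns := if has01 then PySem.Set.add patterns (sigma.map (fun x => 1 - x)) else patterns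
  (k, PySem.Set.len patterns)

def compute_cnk_direct_alt (n : Int) (max_patterns : Int) : List (Int × Int) :=
  let all_vecs := pvAllVecs n
  let best : PySem.Dict Int Int :=
    if max_patterns = 2 then
      let ones := List.replicate n.toNat (1 : Int)    -- (1,)*n
      let zeros := List.replicate n.toNat (0 : Int)   -- (0,)*n
      (PySem.List.enumerate all_vecs 0).foldl (fun best pP =>
        let P := pP.2
        let wP := P.sum
        (PySem.List.slice all_vecs (some pP.1) none).foldl (fun best Q =>
          let wQ := Q.sum
          let pairs : PySem.Set (Int × Int) := PySem.Set.ofList (P.zip Q)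
          let has11 := PySem.Set.contains pairs (1, 1)
          let has00 := PySem.Set.contains pairs (0, 0)
          let has10 := PySem.Set.contains pairs (1, 0)
          let has01 := PySem.Set.contains pairs (0, 1)
          all_vecs.foldl (fun best sigma =>
            let kc := pvInnerB n P Q ones zeros has11 has00 has10 has01 wP wQ sigma
            pvUpdate best kc.1 kc.2) best) best) PySem.Dict.empty
    else PySem.Dict.empty
  best.items

-- ===== PRECONDITION & SPEC =====
-- Pre_ excludes only n < 0, where the Python A raises ValueError (itertools.product with negative repeat).
def Pre_compute_cnk_direct (n : Int) (max_patterns : Int) : Prop := 0 ≤ n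
instance (n : Int) (max_patterns : Int) : Decidable (Pre_compute_cnk_direct n max_patterns) := by
  unfold Pre_compute_cnk_direct; infer_instance

def pvWitness_compute_cnk_direct : Int × Int := (2, 2)

def Spec_compute_cnk_direct (n : Int) (max_patterns : Int) (out : List (Int × Int)) : Prop := out = compute_cnk_direct_alt n max_patterns
instance (n : Int) (max_patterns : Int) (out : List (Int × Int)) : Decidable (Spec_compute_cnk_direct n max_patterns out) := by unfold Spec_compute_cnk_direct; infer_instance

-- ===== CLAIM (what is proved, stated in full; the proofs are below) =====
def Claim_equal_compute_cnk_direct : Prop := ∀ (n : Int) (max_patterns : Int), Dom_compute_cnk_direct n max_patterns → Pre_compute_cnk_direct n max_patterns → Spec_compute_cnk_direct n max_patterns (compute_cnk_direct n max_patterns)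

-- ===== LEMMAS AND PROOFS =====

-- every vector from pvProdNat m has length m and 0/1 entries
theorem pvProdNat_mem {m : Nat} {v : List Int} (h : v ∈ pvProdNat m) :
    v.length = m ∧ ∀ x ∈ v, x = 0 ∨ x = 1 := by
  induction m generalizing v with
  | zero => simp [pvProdNat] at h; simp [h]
  | succ m ih =>
    simp only [pvProdNat, List.mem_flatMap, List.mem_map] at h
    obtain ⟨b, hb, w, hw, rfl⟩ := h
    obtain ⟨hl, he⟩ := ih hw
    refine ⟨by simp [hl], ?_⟩
    intro x hx
    rcases List.mem_cons.mp hx with rfl | hx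
    · simpa using hb
    · exact he _ hx

-- fold of a product state whose components do not interact
theorem pv_foldl_prod {α β γ : Type} (L : List α) (f : β → α → β) (g : γ → α → γ) (b : β) (c : γ) :
    L.foldl (fun acc x => (f acc.1 x, g acc.2 x)) (b, c) = (L.foldl f b, L.foldl g c) := by
  induction L generalizing b c with
  | nil => rfl
  | cons x xs ih => simpa using ih (f b x) (g c x)

-- a running sum is the sum of a map
theorem pv_foldl_add_sum {α : Type} (L : List α) (f : α → Int) (c : Int) :
    L.foldl (fun k x => k + f x) c = c + (L.map f).sum := by
  induction L generalizing c with
  | nil => simp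
  | cons x xs ih => simp [ih]; ring

-- sum of 'p where sigma[i] else q' over a 0/1 vector sigma
theorem pv_map_ite_sum (sigma : List Int) (hb : ∀ x ∈ sigma, x = 0 ∨ x = 1) (p q : Int) :
    (sigma.map (fun x => if x ≠ 0 then p else q)).sum
      = sigma.sum * p + ((sigma.length : Int) - sigma.sum) * q := by
  induction sigma with
  | nil => simp
  | cons x xs ih =>
    have hx := hb x (by simp)
    have ihx := ih (fun y hy => hb y (by simp [hy]))
    rcases hx with rfl | rfl <;>
      simp only [List.map_cons, List.sum_cons, List.length_cons, ihx] <;> push_cast <;> ring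

-- the four selector maps over a 0/1 vector sigma
theorem pv_sel11 (sigma : List Int) :
    sigma.map (fun x => if x ≠ 0 then (1 : Int) else 1) = List.replicate sigma.length 1 := by
  simp [List.map_const']

theorem pv_sel00 (sigma : List Int) :
    sigma.map (fun x => if x ≠ 0 then (0 : Int) else 0) = List.replicate sigma.length 0 := by
  simp [List.map_const']

theorem pv_sel10 (sigma : List Int) (hb : ∀ x ∈ sigma, x = 0 ∨ x = 1) :
    sigma.map (fun x => if x ≠ 0 then (1 : Int) else 0) = sigma := by
  have h : ∀ x ∈ sigma, (if x ≠ 0 then (1 : Int) else 0) = id x := by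
    intro x hx; rcases hb x hx with rfl | rfl <;> simp
  rw [List.map_congr_left h, List.map_id]

theorem pv_sel01 (sigma : List Int) (hb : ∀ x ∈ sigma, x = 0 ∨ x = 1) :
    sigma.map (fun x => if x ≠ 0 then (0 : Int) else 1) = sigma.map (fun x => 1 - x) := by
  have h : ∀ x ∈ sigma, (if x ≠ 0 then (0 : Int) else 1) = 1 - x := by
    intro x hx; rcases hb x hx with rfl | rfl <;> simp
  rw [List.map_congr_left h]

-- nodup is preserved by a fold of Set.add
theorem pv_nodup_foldl_add {α β : Type} [BEq α] [LawfulBEq α] (L : List β) (f : β → α)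
    (s : PySem.Set α) (hs : s.Nodup) :
    (L.foldl (fun s b => PySem.Set.add s (f b)) s).Nodup := by
  induction L generalizing s with
  | nil => exact hs
  | cons x xs ih => exact ih _ (PySem.Set.nodup_add _ _ hs)

-- membership and nodup through a conditional add
theorem pv_mem_cond_add {α : Type} [BEq α] [LawfulBEq α] (c : Bool) (s : PySem.Set α) (x y : α) :
    (y ∈ if c then PySem.Set.add s x else s) ↔ y ∈ s ∨ (c = true ∧ y = x) := by
  cases c <;> simp [PySem.Set.mem_add]

theorem pv_nodup_cond_add {α : Type} [BEq α] [LawfulBEq α] (c : Bool) (s : PySem.Set α) (x : α)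
    (hs : s.Nodup) : (if c then PySem.Set.add s x else s).Nodup := by
  cases c <;> simp [hs, PySem.Set.nodup_add _ _ hs]

-- the key pointwise lemma: A's inner body equals B's inner body
set_option maxHeartbeats 1600000 in
theorem pv_inner_eq (n : Int) (hn : 0 ≤ n) (P Q sigma : List Int)
    (hP : P ∈ pvAllVecs n) (hQ : Q ∈ pvAllVecs n) (hS : sigma ∈ pvAllVecs n) :
    pvInnerA n P Q sigma
      = pvInnerB n P Q (List.replicate n.toNat 1) (List.replicate n.toNat 0)
          (PySem.Set.contains (PySem.Set.ofList (P.zip Q)) (1, 1))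
          (PySem.Set.contains (PySem.Set.ofList (P.zip Q)) (0, 0))
          (PySem.Set.contains (PySem.Set.ofList (P.zip Q)) (1, 0))
          (PySem.Set.contains (PySem.Set.ofList (P.zip Q)) (0, 1))
          P.sum Q.sum sigma := by
  obtain ⟨hPl, hPb⟩ := pvProdNat_mem (show P ∈ pvProdNat n.toNat from hP)
  obtain ⟨hQl, hQb⟩ := pvProdNat_mem (show Q ∈ pvProdNat n.toNat from hQ)
  obtain ⟨hSl, hSb⟩ := pvProdNat_mem (show sigma ∈ pvProdNat n.toNat from hS)
  have hm : ((n.toNat : Int)) = n := Int.toNat_of_nonneg hn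
  have hSn : ((sigma.length : Int)) = n := by rw [hSl, hm]
  have hPn : ((P.length : Int)) = n := by rw [hPl, hm]
  have hQn : ((Q.length : Int)) = n := by rw [hQl, hm]
  -- the column built for j is sigma mapped through a selector
  have hcol : ∀ p q : Int,
      (PySem.List.pyRange 0 n 1).map (fun i => if PySem.List.pyGetD sigma i 0 ≠ 0 then p else q)
        = sigma.map (fun x => if x ≠ 0 then p else q) := by
    intro p q
    have h1 : (PySem.List.pyRange 0 n 1).map
          (fun i => if PySem.List.pyGetD sigma i 0 ≠ 0 then p else q)
        = ((PySem.List.pyRange 0 n 1).map (fun i => PySem.List.pyGetD sigma i 0)).map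
            (fun x => if x ≠ 0 then p else q) := by
      rw [List.map_map]; rfl
    rw [h1, ← hSn, PySem.List.map_pyGetD_pyRange_zero']
  simp only [pvInnerA, pvInnerB, hcol]
  rw [pv_foldl_prod (PySem.List.pyRange 0 n 1)
      (fun k j => k + (sigma.map (fun x => if x ≠ 0 then PySem.List.pyGetD P j 0
                                           else PySem.List.pyGetD Q j 0)).sum)
      (fun S j => PySem.Set.add S (sigma.map (fun x => if x ≠ 0 then PySem.List.pyGetD P j 0
                                                       else PySem.List.pyGetD Q j 0)))
      0 (PySem.Set.add (PySem.Set.add PySem.Set.empty P) Q)]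
  have hmapP : (PySem.List.pyRange 0 n 1).map (fun j => PySem.List.pyGetD P j 0) = P := by
    rw [← hPn, PySem.List.map_pyGetD_pyRange_zero']
  have hmapQ : (PySem.List.pyRange 0 n 1).map (fun j => PySem.List.pyGetD Q j 0) = Q := by
    rw [← hQn, PySem.List.map_pyGetD_pyRange_zero']
  refine Prod.ext ?_ ?_
  · -- the k component
    show (PySem.List.pyRange 0 n 1).foldl _ 0 = sigma.sum * P.sum + (n - sigma.sum) * Q.sum
    rw [pv_foldl_add_sum]
    simp only [pv_map_ite_sum sigma hSb, hSn]
    rw [show (fun j => sigma.sum * PySem.List.pyGetD P j 0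
            + (n - sigma.sum) * PySem.List.pyGetD Q j 0)
          = (fun j => (fun j => sigma.sum * PySem.List.pyGetD P j 0) j
            + (fun j => (n - sigma.sum) * PySem.List.pyGetD Q j 0) j) from rfl,
        PySem.List.sum_map_add_int, List.sum_map_mul_left, List.sum_map_mul_left, hmapP, hmapQ]
    ring
  · -- the comp component
    show PySem.Set.len _ = PySem.Set.len _
    rw [PySem.Set.len_eq, PySem.Set.len_eq]
    have hofL : PySem.Set.ofList [P, Q] = PySem.Set.add (PySem.Set.add PySem.Set.empty P) Q := rfl
    have ndS0 : (PySem.Set.add (PySem.Set.add (PySem.Set.empty (α := List Int)) P) Q).Nodup :=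
      PySem.Set.nodup_add _ _ (PySem.Set.nodup_add _ _ List.nodup_nil)
    have ndA : ((PySem.List.pyRange 0 n 1).foldl
        (fun S j => PySem.Set.add S (sigma.map (fun x => if x ≠ 0 then PySem.List.pyGetD P j 0
                                                         else PySem.List.pyGetD Q j 0)))
        (PySem.Set.add (PySem.Set.add PySem.Set.empty P) Q)).Nodup :=
      pv_nodup_foldl_add _ _ _ ndS0
    congr 1
    refine List.Perm.length_eq ((List.perm_ext_iff_of_nodup ndA ?_).mpr ?_)
    · apply pv_nodup_cond_add
      apply pv_nodup_cond_add
      apply pv_nodup_cond_add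
      apply pv_nodup_cond_add
      rw [hofL]; exact ndS0
    intro y
    rw [PySem.Set.mem_foldl_add]
    -- characterise the columns reachable from some j
    have htail : (∃ j ∈ PySem.List.pyRange 0 n 1,
          y = sigma.map (fun x => if x ≠ 0 then PySem.List.pyGetD P j 0
                                  else PySem.List.pyGetD Q j 0))
        ↔ ((1, 1) ∈ P.zip Q ∧ y = List.replicate n.toNat 1)
          ∨ ((0, 0) ∈ P.zip Q ∧ y = List.replicate n.toNat 0)
          ∨ ((1, 0) ∈ P.zip Q ∧ y = sigma)
          ∨ ((0, 1) ∈ P.zip Q ∧ y = sigma.map (fun x => 1 - x)) := by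
      have hzl : (P.zip Q).length = n.toNat := by
        rw [List.length_zip, hPl, hQl, Nat.min_self]
      constructor
      · rintro ⟨j, hj, rfl⟩
        obtain ⟨hj0, hjn⟩ := PySem.List.mem_pyRange_one.mp hj
        have hjk : (j.toNat : Int) = j := Int.toNat_of_nonneg hj0
        have hkP : j.toNat < P.length := by omega
        have hkQ : j.toNat < Q.length := by omega
        have hgp : PySem.List.pyGetD P j 0 = P[j.toNat] :=
          PySem.List.pyGetD_eq_getElem P 0 hj0 (by omega)
        have hgq : PySem.List.pyGetD Q j 0 = Q[j.toNat] :=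
          PySem.List.pyGetD_eq_getElem Q 0 hj0 (by omega)
        have hkz : j.toNat < (P.zip Q).length := by omega
        have hpair : (P[j.toNat], Q[j.toNat]) ∈ P.zip Q := by
          have := List.getElem_zip (l := P) (l' := Q) (i := j.toNat) (h := hkz)
          rw [← this]; exact List.getElem_mem hkz
        rw [hgp, hgq]
        rcases hPb _ (List.getElem_mem hkP) with hp | hp <;>
          rcases hQb _ (List.getElem_mem hkQ) with hq | hq <;>
            rw [hp, hq] at hpair ⊢
        · exact Or.inr (Or.inl ⟨hpair, by rw [pv_sel00 sigma, hSl]⟩)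
        · exact Or.inr (Or.inr (Or.inr ⟨hpair, pv_sel01 sigma hSb⟩))
        · exact Or.inr (Or.inr (Or.inl ⟨hpair, pv_sel10 sigma hSb⟩))
        · exact Or.inl ⟨hpair, by rw [pv_sel11 sigma, hSl]⟩
      · have hidx : ∀ a b : Int, (a, b) ∈ P.zip Q →
            ∃ j ∈ PySem.List.pyRange 0 n 1,
              PySem.List.pyGetD P j 0 = a ∧ PySem.List.pyGetD Q j 0 = b := by
          intro a b hab
          obtain ⟨k, hk, hkeq⟩ := List.mem_iff_getElem.mp hab
          have hzab : P[k]'(by omega) = a ∧ Q[k]'(by omega) = b := by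
            have := List.getElem_zip (l := P) (l' := Q) (i := k) (h := hk)
            rw [hkeq] at this
            exact ⟨(Prod.mk.injEq _ _ _ _ ▸ this.symm).1, (Prod.mk.injEq _ _ _ _ ▸ this.symm).2⟩
          refine ⟨(k : Int), PySem.List.mem_pyRange_one.mpr ⟨by positivity, by
            rw [← hm]; exact_mod_cast (by omega : k < n.toNat)⟩, ?_, ?_⟩
          · rw [PySem.List.pyGetD_eq_getElem P 0 (by positivity) (by exact_mod_cast (by omega : k < P.length))]
            simpa using hzab.1
          · rw [PySem.List.pyGetD_eq_getElem Q 0 (by positivity) (by exact_mod_cast (by omega : k < Q.length))]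
            simpa using hzab.2
        rintro (⟨hmem, hy⟩ | ⟨hmem, hy⟩ | ⟨hmem, hy⟩ | ⟨hmem, hy⟩) <;>
          obtain ⟨j, hj, h1, h2⟩ := hidx _ _ hmem <;> refine ⟨j, hj, ?_⟩ <;> rw [h1, h2]
        · rw [pv_sel11 sigma, hSl]; exact hy
        · rw [pv_sel00 sigma, hSl]; exact hy
        · rw [pv_sel10 sigma hSb]; exact hy
        · rw [pv_sel01 sigma hSb]; exact hy
    rw [htail, pv_mem_cond_add, pv_mem_cond_add, pv_mem_cond_add, pv_mem_cond_add, hofL]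
    simp only [PySem.Set.mem_add, PySem.Set.contains_iff, PySem.Set.mem_ofList,
      PySem.Set.empty, List.not_mem_nil]
    tauto

-- ===== VERDICT (by name: the statement is the Claim_ definition above) =====
theorem compute_cnk_direct_spec : Claim_equal_compute_cnk_direct := by
  intro n maxp _ hn
  unfold Spec_compute_cnk_direct compute_cnk_direct compute_cnk_direct_alt
  by_cases h : maxp = 2
  · simp only [h]
    congr 1
    apply PySem.List.foldl_congr_mem
    intro best pP hpP
    have hPmem : pP.2 ∈ pvAllVecs n := by
      rcases (PySem.List.mem_enumerate_iff _ _ _).mp hpP with ⟨k, hk, rfl⟩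
      exact List.getElem_mem hk
    apply PySem.List.foldl_congr_mem
    intro best Q hQ
    have hQmem : Q ∈ pvAllVecs n := PySem.List.mem_of_mem_slice _ _ _ hQ
    apply PySem.List.foldl_congr_mem
    intro best sigma hSmem
    rw [pv_inner_eq n hn pP.2 Q sigma hPmem hQmem hSmem]
  · simp [h]
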